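-- pv_equiv track=rewrite | github.com/jiiiiiw/CodingTest | 프로그래머스/3/12987. 숫자 게임/숫자 게임.py | solution
-- ===== SOURCE A (Python) =====
-- def solution(A, B):
--     from bisect import bisect_right
--
--     B.sort()
--     used = [False] * len(B)
--     score = 0
--
--     for a in A:
--         idx = bisect_right(B, a)
--         while idx < len(B) and used[idx]:
--             idx += 1
--         if idx < len(B):
--             used[idx] = True
--             score += 1
--
--     return score
-- ===== SOURCE B (Python) =====
-- def solution(A, B):
--     # Return-value equivalent to A; does not mutate B in place (A sorts B in place).
--     # Greedy matching driven from the B side: walk sorted(B) once; score doubles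
--     # as the pointer into sorted(A) - each b beats the smallest still-unbeaten a.
--     A2 = sorted(A)
--     score = 0
--     for b in sorted(B):
--         if score < len(A2) and A2[score] < b:
--             score += 1
--     return score
-- ===== Notes on version B (the rewrite author's own statement) =====
-- stated objective: faster
-- what changed: Replaced per-element bisect plus linear used-flag skip scans over an unsorted A (quadratic worst case) by sorting both lists and one pass over sorted B in which the score itself is the pointer into sorted A.
import Mathlib
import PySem

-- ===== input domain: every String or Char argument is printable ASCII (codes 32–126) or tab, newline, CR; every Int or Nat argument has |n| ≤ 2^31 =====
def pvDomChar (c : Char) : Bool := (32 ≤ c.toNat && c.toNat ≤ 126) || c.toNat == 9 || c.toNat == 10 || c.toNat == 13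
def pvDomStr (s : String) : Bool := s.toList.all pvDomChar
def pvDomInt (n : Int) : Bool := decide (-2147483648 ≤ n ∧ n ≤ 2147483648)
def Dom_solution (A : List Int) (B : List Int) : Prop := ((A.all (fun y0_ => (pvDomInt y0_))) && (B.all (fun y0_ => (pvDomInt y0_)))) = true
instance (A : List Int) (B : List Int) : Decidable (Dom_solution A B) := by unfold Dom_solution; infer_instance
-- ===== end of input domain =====

-- B replaces A's per-element bisect + used-flag skip scan by a single pass over sorted B in which the
-- score itself is the pointer into sorted A (asymptotically faster).
-- Note: Python A sorts its argument B in place; the equivalence proved here is about the RETURN value (B does not mutate).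


-- ===== PORT A =====
-- `while idx < len(B) and used[idx]: idx += 1`
def skipUsed (used : List Bool) (i : Nat) : Nat :=
  if h : i < used.length then
    if used[i] then skipUsed used (i + 1) else i
  else i
termination_by used.length - i

-- one iteration of A's `for a in A` loop; state = (used, score)
def solnStep (Bs : List Int) (st : List Bool × Int) (a : Int) : List Bool × Int :=
  let idx := skipUsed st.1 (PySem.List.bisectRight Bs a)
  if idx < Bs.length then (st.1.set idx true, st.2 + 1) else st

def solution (A : List Int) (B : List Int) : Int :=
  let Bs := PySem.List.sorted B (fun x => x) false
  (A.foldl (solnStep Bs) (List.replicate Bs.length false, 0)).2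

-- ===== PORT B =====
-- one iteration of B's `for b in sorted(B)` loop; the state is the score,
-- which doubles as the index into sorted(A): `if score < len(A2) and A2[score] < b: score += 1`
def altStep (As : List Int) (sc : Int) (b : Int) : Int :=
  if sc < (As.length : Int) then
    match PySem.List.pyGet? As sc with
    | some a => if a < b then sc + 1 else sc
    | none => sc
  else sc

def solution_alt (A : List Int) (B : List Int) : Int :=
  let A2 := PySem.List.sorted A (fun x => x) false
  (PySem.List.sorted B (fun x => x) false).foldl (altStep A2) 0

-- ===== PRECONDITION & SPEC =====
def Spec_solution (A : List Int) (B : List Int) (out : Int) : Prop := out = solution_alt A B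
instance (A : List Int) (B : List Int) (out : Int) : Decidable (Spec_solution A B out) := by unfold Spec_solution; infer_instance

-- ===== CLAIM (what is proved, stated in full; the proofs are below) =====
def Claim_equal_solution : Prop := ∀ (A : List Int) (B : List Int), Dom_solution A B → Spec_solution A B (solution A B)

-- ===== LEMMAS AND PROOFS =====

-- semantic model: remove the first element strictly greater than a
def rmGt (a : Int) : List Int → List Int
  | [] => []
  | x :: xs => if a < x then xs else x :: rmGt a xs

def run (S : List Int) (A : List Int) : List Int := A.foldl (fun S a => rmGt a S) S

-- the elements at `false` positions
def mask : List Int → List Bool → List Int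
  | [], _ => []
  | _ :: _, [] => []
  | x :: xs, u :: us => if u then mask xs us else x :: mask xs us

-- A-driven two-pointer count, structurally
def tp : List Int → List Int → Nat
  | [], _ => 0
  | a :: A', R =>
    match R.dropWhile (fun x => decide (x ≤ a)) with
    | [] => 0
    | _ :: R'' => 1 + tp A' R''

-- B-driven two-pointer count (the model of port B's loop)
def tpB : List Int → List Int → Nat
  | [], _ => 0
  | _ :: Bs, [] => tpB Bs []
  | b :: Bs, a :: A' => if a < b then 1 + tpB Bs A' else tpB Bs (a :: A')

theorem rmGt_sublist (a : Int) (S : List Int) : (rmGt a S).Sublist S := by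
  induction S with
  | nil => simp [rmGt]
  | cons x xs ih =>
    simp only [rmGt]
    split
    · exact (List.sublist_cons_self x xs)
    · exact ih.cons₂ x

theorem rmGt_pairwise (a : Int) (S : List Int) (h : S.Pairwise (· ≤ ·)) :
    (rmGt a S).Pairwise (· ≤ ·) := h.sublist (rmGt_sublist a S)

theorem rmGt_all_gt (a : Int) (S : List Int) (h : ∀ y ∈ S, a < y) :
    rmGt a S = S.tail := by
  cases S with
  | nil => rfl
  | cons x xs => simp [rmGt, h x (by simp)]

theorem rmGt_id_of_le (a : Int) (S : List Int) (h : ∀ y ∈ S, y ≤ a) :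
    rmGt a S = S := by
  induction S with
  | nil => rfl
  | cons x xs ih =>
    have hxa := h x (by simp)
    simp only [rmGt, if_neg (not_lt.mpr hxa)]
    rw [ih (fun y hy => h y (by simp [hy]))]

theorem rmGt_append_le (a : Int) (D R : List Int) (h : ∀ d ∈ D, d ≤ a) :
    rmGt a (D ++ R) = D ++ rmGt a R := by
  induction D with
  | nil => rfl
  | cons d ds ih =>
    have hda := h d (by simp)
    simp only [List.cons_append, rmGt, if_neg (not_lt.mpr hda)]
    rw [ih (fun y hy => h y (by simp [hy]))]

theorem rmGt_eq_split (a : Int) (R : List Int) :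
    rmGt a R = R.takeWhile (fun x => decide (x ≤ a)) ++
      (R.dropWhile (fun x => decide (x ≤ a))).tail := by
  induction R with
  | nil => rfl
  | cons x xs ih =>
    by_cases hx : x ≤ a
    · simp [rmGt, hx, if_neg (not_lt.mpr hx), ih]
    · simp [rmGt, hx, if_pos (not_le.mp hx)]

theorem rmGt_length (a : Int) (S : List Int) :
    (rmGt a S).length = if S.any (fun x => decide (a < x)) then S.length - 1 else S.length := by
  induction S with
  | nil => rfl
  | cons x xs ih =>
    by_cases hx : a < x
    · simp [rmGt, hx]
    · simp only [rmGt, if_neg hx, List.any_cons, List.length_cons,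
        decide_eq_false (show ¬ a < x from hx), Bool.false_or, ih]
      split
      · rename_i h
        have hne : xs ≠ [] := by rintro rfl; simp at h
        have : 0 < xs.length := List.length_pos_iff.mpr hne
        omega
      · rfl

theorem run_length_le (A : List Int) (S : List Int) : (run S A).length ≤ S.length := by
  induction A generalizing S with
  | nil => simp [run]
  | cons a A' ih =>
    have h1 : (run S (a :: A')) = run (rmGt a S) A' := rfl
    have h2 := ih (rmGt a S)
    have h3 : (rmGt a S).length ≤ S.length := (rmGt_sublist a S).length_le
    rw [h1]; omega

theorem run_id (A : List Int) (S : List Int) (h : ∀ a ∈ A, ∀ y ∈ S, y ≤ a) :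
    run S A = S := by
  induction A with
  | nil => rfl
  | cons a A' ih =>
    have : run S (a :: A') = run (rmGt a S) A' := rfl
    rw [this, rmGt_id_of_le a S (h a (by simp))]
    exact ih (fun a' ha' y hy => h a' (by simp [ha']) y hy)

theorem run_append_le (A : List Int) (D R : List Int) (h : ∀ a ∈ A, ∀ d ∈ D, d ≤ a) :
    run (D ++ R) A = D ++ run R A := by
  induction A generalizing R with
  | nil => rfl
  | cons a A' ih =>
    have h1 : run (D ++ R) (a :: A') = run (rmGt a (D ++ R)) A' := rfl
    rw [h1, rmGt_append_le a D R (h a (by simp)),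
      ih (rmGt a R) (fun a' ha' d hd => h a' (by simp [ha']) d hd)]
    rfl

theorem rmGt_comm_le (a b : Int) (hab : a ≤ b) (S : List Int) (hs : S.Pairwise (· ≤ ·)) :
    rmGt a (rmGt b S) = rmGt b (rmGt a S) := by
  induction S with
  | nil => rfl
  | cons x xs ih =>
    have hx := List.pairwise_cons.mp hs
    by_cases ha : a < x
    · by_cases hb : b < x
      · have hall : ∀ y ∈ xs, a < y := fun y hy => lt_of_lt_of_le ha (hx.1 y hy)
        have hallb : ∀ y ∈ xs, b < y := fun y hy => lt_of_lt_of_le hb (hx.1 y hy)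
        simp only [rmGt, if_pos ha, if_pos hb]
        rw [rmGt_all_gt a xs hall, rmGt_all_gt b xs hallb]
      · simp [rmGt, if_neg hb, if_pos ha]
    · have hb : ¬ b < x := by omega
      simp only [rmGt, if_neg ha, if_neg hb]
      rw [ih hx.2]

theorem rmGt_comm (a b : Int) (S : List Int) (hs : S.Pairwise (· ≤ ·)) :
    rmGt a (rmGt b S) = rmGt b (rmGt a S) := by
  rcases le_total a b with h | h
  · exact rmGt_comm_le a b h S hs
  · exact (rmGt_comm_le b a h S hs).symm

theorem run_perm {A A' : List Int} (hp : A.Perm A') :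
    ∀ S : List Int, S.Pairwise (· ≤ ·) → run S A = run S A' := by
  induction hp with
  | nil => intro S _; rfl
  | cons x _ ih =>
    intro S hs
    have h1 : ∀ l, run S (x :: l) = run (rmGt x S) l := fun _ => rfl
    rw [h1, h1, ih (rmGt x S) (rmGt_pairwise x S hs)]
  | swap x y l =>
    intro S hs
    have h1 : run S (y :: x :: l) = run (rmGt x (rmGt y S)) l := rfl
    have h2 : run S (x :: y :: l) = run (rmGt y (rmGt x S)) l := rfl
    rw [h1, h2, rmGt_comm x y S hs]
  | trans _ _ ih1 ih2 =>
    intro S hs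
    rw [ih1 S hs, ih2 S hs]

-- ---- skipUsed lemmas ----
theorem skipUsed_nil (i : Nat) : skipUsed [] i = i := by
  unfold skipUsed; simp

theorem skipUsed_cons_succ (u : Bool) (us : List Bool) (i : Nat) :
    skipUsed (u :: us) (i + 1) = skipUsed us i + 1 := by
  by_cases h : i < us.length
  · have h' : i + 1 < (u :: us).length := by simp; omega
    have hg : (u :: us)[i+1]'h' = us[i]'h := by simp
    conv_lhs => rw [skipUsed]
    conv_rhs => rw [skipUsed]
    rw [dif_pos h', dif_pos h, hg]
    by_cases hu : us[i]'h = true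
    · rw [if_pos hu, if_pos hu, skipUsed_cons_succ u us (i+1)]
    · rw [if_neg hu, if_neg hu]
  · have h' : ¬ (i + 1 < (u :: us).length) := by simp; omega
    conv_lhs => rw [skipUsed]
    conv_rhs => rw [skipUsed]
    rw [dif_neg h', dif_neg h]
termination_by us.length - i

theorem skipUsed_false (us : List Bool) : skipUsed (false :: us) 0 = 0 := by
  rw [skipUsed]; simp

theorem skipUsed_true (us : List Bool) : skipUsed (true :: us) 0 = skipUsed us 0 + 1 := by
  rw [skipUsed]; simp [skipUsed_cons_succ]

-- ---- mask lemmas ----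
theorem mask_replicate (Bs : List Int) : mask Bs (List.replicate Bs.length false) = Bs := by
  induction Bs with
  | nil => rfl
  | cons x xs ih => simp [mask, List.replicate, ih]

-- step lemma, all-greater case
theorem step_allgt (a : Int) (Bs : List Int) (used : List Bool)
    (hl : used.length = Bs.length) (h : ∀ y ∈ Bs, a < y) :
    mask Bs (used.set (skipUsed used 0) true) = rmGt a (mask Bs used) ∧
      (skipUsed used 0 < Bs.length ↔ (mask Bs used).any (fun x => decide (a < x))) := by
  induction used generalizing Bs with
  | nil =>
    cases Bs with
    | nil => simp [skipUsed_nil, mask, rmGt]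
    | cons x xs => simp at hl
  | cons u us ih =>
    cases Bs with
    | nil => simp at hl
    | cons x xs =>
      have hl' : us.length = xs.length := by simpa using hl
      have h' : ∀ y ∈ xs, a < y := fun y hy => h y (by simp [hy])
      cases u with
      | false =>
        rw [skipUsed_false]
        simp [mask, rmGt, h x (by simp)]
      | true =>
        rw [skipUsed_true]
        have := ih xs hl' h'
        simp only [mask, List.set_cons_succ] at *
        constructor
        · simpa [mask] using this.1
        · simpa [mask, Nat.succ_lt_succ_iff] using this.2

-- bisectRight equals length of the ≤-takeWhile prefix on a sorted list
theorem takeWhile_len_of_split (a : Int) :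
    ∀ (Bs : List Int) (k : Nat), k ≤ Bs.length →
      (∀ (j : Nat) (hj : j < Bs.length), j < k → Bs[j] ≤ a) →
      (∀ (j : Nat) (hj : j < Bs.length), k ≤ j → a < Bs[j]) →
      (Bs.takeWhile (fun x => decide (x ≤ a))).length = k := by
  intro Bs
  induction Bs with
  | nil => intro k hk _ _; simp at hk; simp [hk]
  | cons x xs ih =>
    intro k hk hlt hgt
    cases k with
    | zero =>
      have : a < x := hgt 0 (by simp) (by omega)
      simp [show ¬ (x ≤ a) from by omega]
    | succ k' =>
      have hx : x ≤ a := hlt 0 (by simp) (by omega)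
      simp only [List.takeWhile_cons, decide_eq_true_eq, if_pos hx, List.length_cons]
      rw [ih k' (by simpa using hk)
        (fun j hj hjk => hlt (j+1) (by simpa using Nat.succ_lt_succ hj) (by omega))
        (fun j hj hjk => hgt (j+1) (by simpa using Nat.succ_lt_succ hj) (by omega))]

theorem bisectRight_eq_takeWhile (Bs : List Int) (a : Int) (hs : Bs.Pairwise (· ≤ ·)) :
    PySem.List.bisectRight Bs a = (Bs.takeWhile (fun x => decide (x ≤ a))).length := by
  obtain ⟨hle, hlt, hgt⟩ := PySem.List.bisectRight_spec Bs a hs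
  exact (takeWhile_len_of_split a Bs _ hle hlt hgt).symm

-- the main step lemma, with bisectRight replaced by the takeWhile length
theorem step_mask_tw (a : Int) : ∀ (Bs : List Int) (used : List Bool),
    Bs.Pairwise (· ≤ ·) → used.length = Bs.length →
    mask Bs (used.set (skipUsed used (Bs.takeWhile (fun x => decide (x ≤ a))).length) true) =
        rmGt a (mask Bs used) ∧
      (skipUsed used (Bs.takeWhile (fun x => decide (x ≤ a))).length < Bs.length ↔
        (mask Bs used).any (fun x => decide (a < x))) := by
  intro Bs
  induction Bs with
  | nil =>
    intro used hs hl
    cases used with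
    | nil => simp [skipUsed_nil, mask, rmGt]
    | cons => simp at hl
  | cons x xs ih =>
    intro used hs hl
    cases used with
    | nil => simp at hl
    | cons u us =>
      have hl' : us.length = xs.length := by simpa using hl
      have hx := List.pairwise_cons.mp hs
      by_cases hxa : x ≤ a
      · simp only [List.takeWhile_cons, decide_eq_true_eq, if_pos hxa, List.length_cons]
        rw [skipUsed_cons_succ]
        have hIH := ih us hx.2 hl'
        have hmf : mask (x :: xs) (false :: us) = x :: mask xs us := rfl
        have hmt : mask (x :: xs) (true :: us) = mask xs us := rfl
        cases u with
        | false =>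
          refine ⟨?_, ?_⟩
          · rw [List.set_cons_succ]
            have : mask (x :: xs) (false :: us.set (skipUsed us (List.takeWhile (fun x => decide (x ≤ a)) xs).length) true) =
                x :: mask xs (us.set (skipUsed us (List.takeWhile (fun x => decide (x ≤ a)) xs).length) true) := rfl
            rw [this, hIH.1, hmf]
            simp [rmGt, if_neg (not_lt.mpr hxa)]
          · rw [hmf]
            simp only [List.any_cons, Nat.add_lt_add_iff_right,
              decide_eq_false (not_lt.mpr hxa), Bool.false_or]
            exact hIH.2
        | true =>
          refine ⟨?_, ?_⟩
          · rw [List.set_cons_succ]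
            have : mask (x :: xs) (true :: us.set (skipUsed us (List.takeWhile (fun x => decide (x ≤ a)) xs).length) true) =
                mask xs (us.set (skipUsed us (List.takeWhile (fun x => decide (x ≤ a)) xs).length) true) := rfl
            rw [this, hIH.1, hmt]
          · rw [hmt]
            simp only [Nat.add_lt_add_iff_right]
            exact hIH.2
      · have hallgt : ∀ y ∈ (x :: xs), a < y := by
          intro y hy
          rcases List.mem_cons.mp hy with rfl | hy'
          · omega
          · exact lt_of_lt_of_le (by omega) (hx.1 y hy')
        simp only [List.takeWhile_cons, decide_eq_true_eq, if_neg hxa, List.length_nil]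
        exact step_allgt a (x :: xs) (u :: us) hl hallgt

theorem step_mask (a : Int) (Bs : List Int) (used : List Bool)
    (hs : Bs.Pairwise (· ≤ ·)) (hl : used.length = Bs.length) :
    mask Bs (used.set (skipUsed used (PySem.List.bisectRight Bs a)) true) = rmGt a (mask Bs used) ∧
      (skipUsed used (PySem.List.bisectRight Bs a) < Bs.length ↔
        (mask Bs used).any (fun x => decide (a < x))) := by
  rw [bisectRight_eq_takeWhile Bs a hs]
  exact step_mask_tw a Bs used hs hl

-- fold invariant for port A
theorem foldA_run (A : List Int) (Bs : List Int) (hs : Bs.Pairwise (· ≤ ·)) :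
    ∀ (used : List Bool) (sc : Int), used.length = Bs.length →
      (A.foldl (solnStep Bs) (used, sc)).2 =
        sc + ((mask Bs used).length - (run (mask Bs used) A).length : Nat) := by
  induction A with
  | nil => intro used sc _; simp [run]
  | cons a A' ih =>
    intro used sc hl
    have hst := step_mask a Bs used hs hl
    have hrun : run (mask Bs used) (a :: A') = run (rmGt a (mask Bs used)) A' := rfl
    have hM := rmGt_length a (mask Bs used)
    by_cases hj : skipUsed used (PySem.List.bisectRight Bs a) < Bs.length
    · have hany : (mask Bs used).any (fun x => decide (a < x)) := hst.2.mp hj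
      have h1 : (a :: A').foldl (solnStep Bs) (used, sc) =
          A'.foldl (solnStep Bs) (used.set (skipUsed used (PySem.List.bisectRight Bs a)) true, sc + 1) := by
        simp [List.foldl_cons, solnStep, hj]
      rw [h1, ih _ _ (by simp [hl]), hst.1, hrun]
      have hlen : (rmGt a (mask Bs used)).length = (mask Bs used).length - 1 := by
        rw [hM, if_pos hany]
      have hpos : 0 < (mask Bs used).length := by
        have : (mask Bs used).any (fun x => decide (a < x)) = true := hany
        rcases List.any_eq_true.mp this with ⟨y, hy, _⟩
        exact List.length_pos_iff.mpr (fun hnil => by rw [hnil] at hy; simp at hy)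
      have hle := run_length_le A' (rmGt a (mask Bs used))
      rw [hlen] at hle ⊢
      omega
    · have hnoany : ¬ (mask Bs used).any (fun x => decide (a < x)) := fun hc => hj (hst.2.mpr hc)
      have hid : rmGt a (mask Bs used) = mask Bs used := by
        rw [hM] at *
        apply rmGt_id_of_le
        intro y hy
        by_contra hgt
        exact hnoany (List.any_eq_true.mpr ⟨y, hy, by simp; omega⟩)
      have h1 : (a :: A').foldl (solnStep Bs) (used, sc) = A'.foldl (solnStep Bs) (used, sc) := by
        simp [List.foldl_cons, solnStep, hj]
      rw [h1, ih _ _ hl, hrun, hid]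

-- ---- B-side lemmas ----
-- the B-driven count on an exhausted A-list is zero
theorem tpB_nil_right (Bl : List Int) : tpB Bl [] = 0 := by
  induction Bl with
  | nil => rfl
  | cons b Bs ih => simpa [tpB] using ih

-- the A-driven count on an exhausted B-list is zero
theorem tp_nil_right (A : List Int) : tp A [] = 0 := by
  cases A <;> rfl

-- duality: walking B with a pointer into A counts the same matches as walking A
theorem tpB_eq_tp (Bl : List Int) : ∀ A : List Int, tpB Bl A = tp A Bl := by
  induction Bl with
  | nil => intro A; rw [tp_nil_right]; rfl
  | cons b Bs ih =>
    intro A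
    cases A with
    | nil => rw [tpB_nil_right]; rfl
    | cons a A' =>
      by_cases hab : a < b
      · have hdw : (b :: Bs).dropWhile (fun x => decide (x ≤ a)) = b :: Bs := by
          rw [List.dropWhile_cons]
          simp [show ¬ b ≤ a from by omega]
      -- match head: both count 1 and move on
        rw [show tpB (b :: Bs) (a :: A') = 1 + tpB Bs A' from by simp [tpB, hab],
          show tp (a :: A') (b :: Bs) = 1 + tp A' Bs from by rw [tp, hdw], ih]
      · have hdw : (b :: Bs).dropWhile (fun x => decide (x ≤ a)) =
            Bs.dropWhile (fun x => decide (x ≤ a)) := by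
          rw [List.dropWhile_cons]
          simp [show b ≤ a from by omega]
        rw [show tpB (b :: Bs) (a :: A') = tpB Bs (a :: A') from by simp [tpB, hab], ih]
        simp only [tp, hdw]

-- fold invariant for port B: the score is k plus the matches still to come
theorem foldB_tpB (As : List Int) (Bl : List Int) :
    ∀ (k : Nat), k ≤ As.length →
      Bl.foldl (altStep As) (k : Int) = ((k + tpB Bl (As.drop k) : Nat) : Int) := by
  induction Bl with
  | nil => intro k _; simp [tpB]
  | cons b Bs ih =>
    intro k hk
    by_cases h : k < As.length
    · have hdk : As.drop k = As[k] :: As.drop (k + 1) := List.drop_eq_getElem_cons h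
      have hstep : altStep As (k : Int) b =
          if As[k] < b then ((k : Int) + 1) else (k : Int) := by
        simp [altStep, List.getElem?_eq_getElem h,
          show (k : Int) < (As.length : Int) from by exact_mod_cast h]
      by_cases hab : As[k] < b
      · have : altStep As (k : Int) b = ((k + 1 : Nat) : Int) := by
          rw [hstep, if_pos hab]; push_cast; ring
        rw [List.foldl_cons, this, ih (k + 1) (by omega), hdk]
        simp [tpB, hab]
        omega
      · have : altStep As (k : Int) b = (k : Int) := by rw [hstep, if_neg hab]
        rw [List.foldl_cons, this, ih k hk, hdk]
        simp [tpB, hab]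
    · have hke : k = As.length := by omega
      have hd : As.drop k = [] := by rw [hke]; simp
      have : altStep As (k : Int) b = (k : Int) := by
        simp [altStep, show ¬ ((k : Int) < (As.length : Int)) from by exact_mod_cast h]
      rw [List.foldl_cons, this, ih k hk, hd, tpB_nil_right]
      simp [tpB, tpB_nil_right]

-- tp equals the removal count on sorted inputs
theorem tp_run (A : List Int) (hA : A.Pairwise (· ≤ ·)) :
    ∀ R : List Int, tp A R = R.length - (run R A).length := by
  induction A with
  | nil => intro R; simp [tp, run]
  | cons a A' ih =>
    intro R
    have hAx := List.pairwise_cons.mp hA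
    have hrun : run R (a :: A') = run (rmGt a R) A' := rfl
    rw [rmGt_eq_split a R] at hrun
    set D := R.takeWhile (fun x => decide (x ≤ a)) with hD
    set R' := R.dropWhile (fun x => decide (x ≤ a)) with hR'
    have hDle : ∀ d ∈ D, d ≤ a := by
      intro d hd
      have := List.mem_takeWhile_imp (hD ▸ hd)
      simpa using this
    have hsplit : R = D ++ R' := (List.takeWhile_append_dropWhile).symm
    cases hR'' : R' with
    | nil =>
      rw [tp, ← hR', hR'']
      show (0 : Nat) = R.length - (run R (a :: A')).length
      have hrr : run R (a :: A') = R := by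
        rw [hrun, hR'']
        simp only [List.tail_nil, List.append_nil]
        rw [run_id A' D (fun a' ha' y hy => le_trans (hDle y hy) (hAx.1 a' ha'))]
        rw [hsplit, hR'', List.append_nil]
      rw [hrr]
      omega
    | cons r R'' =>
      rw [tp, ← hR', hR'']
      show 1 + tp A' R'' = R.length - (run R (a :: A')).length
      have h2 : run R (a :: A') = D ++ run R'' A' := by
        rw [hrun, hR'']
        simp only [List.tail_cons]
        exact run_append_le A' D R'' (fun a' ha' d hd => le_trans (hDle d hd) (hAx.1 a' ha'))
      have hlenR : R.length = D.length + 1 + R''.length := by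
        rw [hsplit, hR'']; simp; omega
      rw [h2, ih hAx.2 R'']
      have := run_length_le A' R''
      simp only [List.length_append]
      omega

-- assemble both sides
theorem solution_eq_run (A B : List Int) :
    solution A B =
      ((PySem.List.sorted B (fun x => x) false).length -
        (run (PySem.List.sorted B (fun x => x) false) A).length : Nat) := by
  unfold solution
  rw [foldA_run A _ (PySem.List.sorted_pairwise B (fun x => x)) _ 0 (by simp),
    mask_replicate]
  simp

theorem solution_alt_eq_tp (A B : List Int) :
    solution_alt A B =
      (tp (PySem.List.sorted A (fun x => x) false) (PySem.List.sorted B (fun x => x) false) : Nat) := by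
  unfold solution_alt
  rw [show ((0 : Int) = ((0 : Nat) : Int)) from rfl, foldB_tpB _ _ 0 (by omega)]
  rw [tpB_eq_tp]
  simp

-- ===== VERDICT (by name: the statement is the Claim_ definition above) =====
theorem solution_spec : Claim_equal_solution := by
  intro A B _
  unfold Spec_solution
  rw [solution_eq_run, solution_alt_eq_tp,
    tp_run _ (PySem.List.sorted_pairwise A (fun x => x)) _]
  congr 1
  rw [run_perm (PySem.List.sorted_perm A (fun x => x) false)
    _ (PySem.List.sorted_pairwise B (fun x => x))]
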